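-- pv_equiv track=rewrite | github.com/GodunovaAN/gct-dashboard | scripts/build_gct_dataset.py | unique_headers
-- ===== SOURCE A (Python) =====
-- def clean_header(text: str) -> str:
--     compact = " ".join((text or "").split()).strip()
--     return compact or "Unnamed"
--
-- def unique_headers(headers: list[str]) -> list[str]:
--     seen: dict[str, int] = {}
--     out: list[str] = []
--     for header in headers:
--         base = clean_header(header)
--         count = seen.get(base, 0)
--         seen[base] = count + 1
--         out.append(base if count == 0 else f"{base} ({count + 1})")
--     return out
-- ===== SOURCE B (Python) =====
-- def clean_header(text: str) -> str:
--     compact = " ".join((text or "").split()).strip()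
--     return compact or "Unnamed"
--
-- def unique_headers(headers: list[str]) -> list[str]:
--     cleaned = [clean_header(h) for h in headers]
--     out = [""] * len(cleaned)
--     done = set()
--     for base in cleaned:
--         if base in done:
--             continue
--         done.add(base)
--         idxs = [i for i, c in enumerate(cleaned) if c == base]
--         for k, i in enumerate(idxs):
--             out[i] = base if k == 0 else f"{base} ({k + 1})"
--     return out
-- ===== Notes on version B (the rewrite author's own statement) =====
-- stated objective: alternative
-- what changed: Replaces A's single streaming pass with an incrementally maintained per-name count dict by a group-and-scatter scheme: preallocate the output, then for each distinct cleaned name collect the list of all its positions and write the bare name / numbered labels directly into those slots.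
import Mathlib
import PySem

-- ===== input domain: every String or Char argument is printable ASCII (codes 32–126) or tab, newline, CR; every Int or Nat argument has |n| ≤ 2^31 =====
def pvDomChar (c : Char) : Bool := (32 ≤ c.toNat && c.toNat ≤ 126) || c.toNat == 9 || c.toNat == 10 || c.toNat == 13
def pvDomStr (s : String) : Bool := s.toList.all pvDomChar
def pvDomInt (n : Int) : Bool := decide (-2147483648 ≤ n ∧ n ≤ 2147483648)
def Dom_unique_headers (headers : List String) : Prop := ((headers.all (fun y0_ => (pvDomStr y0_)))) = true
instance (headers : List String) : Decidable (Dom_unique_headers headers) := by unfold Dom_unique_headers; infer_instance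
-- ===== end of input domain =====

-- B replaces A's streaming pass with a seen-count dict by group-and-scatter: preallocate the
-- output and, for each distinct cleaned name, write labels into all of its positions at once
-- (objective: alternative, same values).

-- ===== PORT A =====
def clean_header (text : String) : String :=
  let compact := PySem.Str.strip (PySem.Str.join " " (PySem.Str.split₀ (if text == "" then "" else text)))
  if compact == "" then "Unnamed" else compact

def unique_headers (headers : List String) : List String :=
  (headers.foldl
    (fun (st : PySem.Dict String Int × List String) header =>
      let base := clean_header header
      let count := st.1.getD base 0
      let seen := st.1.insert base (count + 1)
      (seen, st.2 ++ [if count == 0 then base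
                      else base ++ " (" ++ PySem.Int.toStr (count + 1) ++ ")"]))
    (PySem.Dict.empty, [])).2

-- ===== PORT B =====
-- indices coming from enumerate(cleaned) are ≥ 0, so `.toNat` on them is exact
def unique_headers_alt (headers : List String) : List String :=
  let cleaned := headers.map clean_header
  (cleaned.foldl
    (fun (st : PySem.Set String × List String) base =>
      if PySem.Set.contains st.1 base then st
      else
        let done := PySem.Set.add st.1 base
        let idxs := (PySem.List.enumerate cleaned 0).filterMap
          (fun p => if p.2 == base then some p.1 else none)
        let out := (PySem.List.enumerate idxs 0).foldl
          (fun o q => o.set q.2.toNat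
            (if q.1 == 0 then base else base ++ " (" ++ PySem.Int.toStr (q.1 + 1) ++ ")"))
          st.2
        (done, out))
    (PySem.Set.empty, List.replicate cleaned.length "")).2

-- ===== PRECONDITION & SPEC =====
def Spec_unique_headers (headers : List String) (out : List String) : Prop := out = unique_headers_alt headers
instance (headers : List String) (out : List String) : Decidable (Spec_unique_headers headers out) := by unfold Spec_unique_headers; infer_instance

-- ===== CLAIM (what is proved, stated in full; the proofs are below) =====
def Claim_equal_unique_headers : Prop := ∀ (headers : List String), Dom_unique_headers headers → Spec_unique_headers headers (unique_headers headers)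

-- ===== LEMMAS AND PROOFS =====

/-- The output element for a cleaned name `c` with `n` earlier occurrences. -/
def emitHdr (c : String) (n : Nat) : String :=
  if n = 0 then c else c ++ " (" ++ PySem.Int.toStr ((n : Int) + 1) ++ ")"

/-- Outputs for the cleaned suffix `cs` when the cleaned prefix already seen is `p`. -/
def bOut (p cs : List String) : List String :=
  match cs with
  | [] => []
  | c :: t => emitHdr c (p.count c) :: bOut (p ++ [c]) t

lemma A_inv (hs : List String) : ∀ (p acc : List String),
    (hs.foldl
      (fun (st : PySem.Dict String Int × List String) header =>
        let base := clean_header header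
        let count := st.1.getD base 0
        let seen := st.1.insert base (count + 1)
        (seen, st.2 ++ [if count == 0 then base
                        else base ++ " (" ++ PySem.Int.toStr (count + 1) ++ ")"]))
      (p.foldl (fun d x => d.insert x (d.getD x 0 + 1)) PySem.Dict.empty, acc)).2
    = acc ++ bOut p (hs.map clean_header) := by
  induction hs with
  | nil => intro p acc; simp [bOut]
  | cons h t ih =>
    intro p acc
    have hc : (p.foldl (fun d x => d.insert x (d.getD x 0 + 1))
        (PySem.Dict.empty : PySem.Dict String Int)).getD (clean_header h) 0
        = (p.count (clean_header h) : Int) := by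
      rw [PySem.Dict.getD_foldl_insert_add_one]; simp
    have hstate : (p.foldl (fun d x => d.insert x (d.getD x 0 + 1))
          (PySem.Dict.empty : PySem.Dict String Int)).insert (clean_header h)
          ((p.foldl (fun d x => d.insert x (d.getD x 0 + 1))
            (PySem.Dict.empty : PySem.Dict String Int)).getD (clean_header h) 0 + 1)
        = (p ++ [clean_header h]).foldl (fun d x => d.insert x (d.getD x 0 + 1)) PySem.Dict.empty := by
      simp
    simp only [List.foldl_cons, List.map_cons, bOut]
    rw [hstate, ih (p ++ [clean_header h])]
    by_cases h0 : p.count (clean_header h) = 0 <;> simp [hc, emitHdr, h0]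

/-- Overwrite the positions of `b` in a region described by `cl`, numbering from `k0`. -/
def ow (b : String) : Nat → List String → List String → List String
  | _, _, [] => []
  | _, [], out => out
  | k0, c :: cl, v :: out =>
    (if c = b then emitHdr b k0 else v) :: ow b (if c = b then k0 + 1 else k0) cl out

/-- The partially filled output: positions whose cleaned name satisfies `S` carry their label. -/
def maskP (S : String → Bool) : List String → List String → List String
  | _, [] => []
  | p, c :: t => (if S c then emitHdr c (p.count c) else "") :: maskP S (p ++ [c]) t

lemma ow_cons (b : String) (k0 : Nat) (c : String) (cl : List String) (v : String)
    (out : List String) :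
    ow b k0 (c :: cl) (v :: out)
      = (if c = b then emitHdr b k0 else v) :: ow b (if c = b then k0 + 1 else k0) cl out := rfl


lemma maskP_length (S : String → Bool) : ∀ cl p, (maskP S p cl).length = cl.length := by
  intro cl; induction cl with
  | nil => intro p; simp [maskP]
  | cons c t ih => intro p; simp [maskP, ih]

/-- The inner scatter loop of B, over any region: `pre` is the untouched prefix. -/
lemma scatter_eq (b : String) : ∀ (cl : List String) (s k0 : Nat) (pre out : List String),
    pre.length = s → out.length = cl.length →
    ((PySem.List.enumerate
        ((PySem.List.enumerate cl (s : Int)).filterMap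
          (fun p => if p.2 == b then some p.1 else none)) (k0 : Int)).foldl
      (fun o q => o.set q.2.toNat
        (if q.1 == 0 then b else b ++ " (" ++ PySem.Int.toStr (q.1 + 1) ++ ")"))
      (pre ++ out))
    = pre ++ ow b k0 cl out := by
  intro cl
  induction cl with
  | nil =>
    intro s k0 pre out hpre hout
    have hnil : out = [] := List.eq_nil_of_length_eq_zero (by simpa using hout)
    subst hnil
    simp [PySem.List.enumerate_nil, ow]
  | cons c cl ih =>
    intro s k0 pre out hpre hout
    cases out with
    | nil => simp at hout
    | cons v out' =>
      rw [PySem.List.enumerate_cons]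
      by_cases hcb : c = b
      · subst hcb
        simp only [List.filterMap_cons, beq_self_eq_true, if_true]
        rw [PySem.List.enumerate_cons]
        simp only [List.foldl_cons]
        have hX : (if ((k0 : Int) == 0) = true then c
              else c ++ " (" ++ PySem.Int.toStr ((k0 : Int) + 1) ++ ")") = emitHdr c k0 := by
          by_cases hk : k0 = 0 <;> simp [hk, emitHdr]
        have hset : (pre ++ v :: out').set ((s : Int)).toNat
            (if ((k0 : Int) == 0) = true then c
             else c ++ " (" ++ PySem.Int.toStr ((k0 : Int) + 1) ++ ")")
            = pre ++ emitHdr c k0 :: out' := by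
          have hs' : ((s : Int)).toNat = pre.length := by omega
          rw [hX, hs', List.set_append, if_neg (lt_irrefl _), Nat.sub_self, List.set_cons_zero]
        rw [hset]
        have h1 : ((s : Int) + 1) = ((s + 1 : Nat) : Int) := by push_cast; ring
        have h2 : ((k0 : Int) + 1) = ((k0 + 1 : Nat) : Int) := by push_cast; ring
        rw [h1, h2]
        have h3 : pre ++ emitHdr c k0 :: out' = (pre ++ [emitHdr c k0]) ++ out' := by simp
        rw [h3, ih (s + 1) (k0 + 1) (pre ++ [emitHdr c k0]) out'
          (by simp [hpre]) (by simpa using hout)]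
        simp [ow]
      · have hbeq : (c == b) = false := by simpa using hcb
        simp only [List.filterMap_cons, hbeq, Bool.false_eq_true, if_false]
        have h1 : ((s : Int) + 1) = ((s + 1 : Nat) : Int) := by push_cast; ring
        rw [h1]
        have h3 : pre ++ v :: out' = (pre ++ [v]) ++ out' := by simp
        rw [h3, ih (s + 1) k0 (pre ++ [v]) out' (by simp [hpre]) (by simpa using hout)]
        simp [ow, hcb]

/-- Overwriting the positions of an unseen name upgrades the mask. -/
lemma ow_mask (b : String) (S : String → Bool) (hb : S b = false) :
    ∀ (cl p : List String),
    ow b (p.count b) cl (maskP S p cl) = maskP (fun c => S c || c == b) p cl := by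
  intro cl
  induction cl with
  | nil => intro p; simp [ow, maskP]
  | cons c t ih =>
    intro p
    rw [show maskP S p (c :: t)
          = (if S c then emitHdr c (p.count c) else "") :: maskP S (p ++ [c]) t from rfl,
        show maskP (fun x => S x || x == b) p (c :: t)
          = (if (S c || c == b) then emitHdr c (p.count c) else "")
              :: maskP (fun x => S x || x == b) (p ++ [c]) t from rfl,
        ow_cons]
    by_cases hcb : c = b
    · subst hcb
      have h1 : (p ++ [c]).count c = p.count c + 1 := by simp
      rw [if_pos rfl, if_pos rfl]
      congr 1
      · simp [hb]
      · rw [← h1, ih (p ++ [c])]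
    · have hbeq : (c == b) = false := by simpa using hcb
      rw [if_neg hcb, if_neg hcb, hbeq, Bool.or_false]
      congr 1
      have h1 : (p ++ [c]).count b = p.count b := by simp [List.count_append, hcb]
      rw [← h1, ih (p ++ [c])]

/-- Outer loop invariant of B: after processing `cs` with seen-set `D`,
    the output is the mask of names seen so far. -/
lemma B_inv (cleaned : List String) : ∀ (cs : List String) (D : PySem.Set String),
    (cs.foldl
      (fun (st : PySem.Set String × List String) base =>
        if PySem.Set.contains st.1 base then st
        else
          (PySem.Set.add st.1 base,
           (PySem.List.enumerate
              ((PySem.List.enumerate cleaned 0).filterMap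
                (fun p => if p.2 == base then some p.1 else none)) 0).foldl
             (fun o q => o.set q.2.toNat
               (if q.1 == 0 then base else base ++ " (" ++ PySem.Int.toStr (q.1 + 1) ++ ")"))
             st.2))
      (D, maskP (fun c => decide (c ∈ D)) [] cleaned)).2
    = maskP (fun c => decide (c ∈ D) || decide (c ∈ cs)) [] cleaned := by
  intro cs
  induction cs with
  | nil =>
    intro D
    simp only [List.foldl_nil]
    congr 1
    funext c
    simp
  | cons b t ih =>
    intro D
    simp only [List.foldl_cons]
    by_cases hbD : b ∈ D
    · have hcont : PySem.Set.contains D b = true := (PySem.Set.contains_iff D b).mpr hbD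
      rw [if_pos hcont, ih D]
      congr 1
      funext c
      by_cases hcb : c = b
      · subst hcb; simp [hbD]
      · simp [List.mem_cons, hcb]
    · have hcont : ¬ (PySem.Set.contains D b = true) := by
        intro h; exact hbD ((PySem.Set.contains_iff D b).mp h)
      rw [if_neg hcont]
      have hscat := scatter_eq b cleaned 0 0 [] (maskP (fun c => decide (c ∈ D)) [] cleaned)
        rfl (maskP_length _ _ _)
      simp only [List.nil_append, Nat.cast_zero] at hscat
      rw [hscat]
      have h0 : ([] : List String).count b = 0 := rfl
      rw [← h0, ow_mask b (fun c => decide (c ∈ D)) (by simp [hbD]) cleaned []]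
      have hSadd : (fun c => decide (c ∈ D) || c == b)
          = (fun c => decide (c ∈ PySem.Set.add D b)) := by
        funext c
        by_cases hcb : c = b <;> simp [PySem.Set.mem_add, hcb]
      rw [hSadd, ih (PySem.Set.add D b)]
      congr 1
      funext c
      simp [PySem.Set.mem_add, List.mem_cons, Bool.or_assoc, Bool.or_comm,
        Bool.or_left_comm]

/-- Once every name of `cl` is in the mask, the mask is the full output. -/
lemma maskP_full (S : String → Bool) : ∀ (cl p : List String), (∀ c ∈ cl, S c = true) →
    maskP S p cl = bOut p cl := by
  intro cl
  induction cl with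
  | nil => intro p _; rfl
  | cons c t ih =>
    intro p h
    simp only [maskP, bOut, h c (by simp), if_pos]
    rw [ih (p ++ [c]) (fun x hx => h x (by simp [hx]))]

lemma maskP_false : ∀ (cl p : List String),
    maskP (fun _ => false) p cl = List.replicate cl.length "" := by
  intro cl
  induction cl with
  | nil => intro p; rfl
  | cons c t ih => intro p; simp [maskP, ih, List.replicate_succ]

-- ===== VERDICT (by name: the statement is the Claim_ definition above) =====
theorem unique_headers_spec : Claim_equal_unique_headers := by
  intro headers _
  unfold Spec_unique_headers
  simp only [unique_headers, unique_headers_alt]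
  have ha := A_inv headers [] []
  simp only [List.foldl_nil] at ha
  rw [ha]
  have hinit : List.replicate (headers.map clean_header).length ""
      = maskP (fun c => decide (c ∈ (PySem.Set.empty : PySem.Set String))) [] (headers.map clean_header) := by
    rw [← maskP_false (headers.map clean_header) []]
    congr 1
  rw [hinit]
  have hb := B_inv (headers.map clean_header) (headers.map clean_header) PySem.Set.empty
  rw [hb]
  rw [maskP_full _ (headers.map clean_header) [] (by intro c hc; simp [hc])]
  simp
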